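-- pv_equiv track=rewrite | github.com/EgorLappo/ac_lattices | utils.py | name_internal_newick
-- ===== SOURCE A (Python) =====
-- def name_internal_newick(newick_tree, label= "d"):
--     """Names internal 'nodes' in a Newick string.
--
--     Args:
--         newick_tree (str): Newick string with __unnamed__ internal nodes.
--         label (str, optional): prefix for internal node names. Defaults to "d".
--
--     Returns:
--         str: Newick string with named internal nodes.
--     """
--     i = 1
--     new_tree = []
--     for ch in newick_tree:
--         new_tree.append(ch)
--         if ch == ")":
--             new_tree.append(label+str(i))
--             i += 1
--     return ''.join(new_tree)
-- ===== SOURCE B (Python) =====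
-- def name_internal_newick(newick_tree, label="d"):
--     parts = newick_tree.split(")")
--     pieces = [parts[0]]
--     for i, seg in enumerate(parts[1:], 1):
--         pieces.append(")" + label + str(i) + seg)
--     return "".join(pieces)
-- ===== Notes on version B (the rewrite author's own statement) =====
-- stated objective: idiomatic
-- what changed: B splits the string on the close-paren once and rebuilds the result by joining labeled segments, instead of A's character-by-character scan with an explicit counter and per-char append list.
import Mathlib
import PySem

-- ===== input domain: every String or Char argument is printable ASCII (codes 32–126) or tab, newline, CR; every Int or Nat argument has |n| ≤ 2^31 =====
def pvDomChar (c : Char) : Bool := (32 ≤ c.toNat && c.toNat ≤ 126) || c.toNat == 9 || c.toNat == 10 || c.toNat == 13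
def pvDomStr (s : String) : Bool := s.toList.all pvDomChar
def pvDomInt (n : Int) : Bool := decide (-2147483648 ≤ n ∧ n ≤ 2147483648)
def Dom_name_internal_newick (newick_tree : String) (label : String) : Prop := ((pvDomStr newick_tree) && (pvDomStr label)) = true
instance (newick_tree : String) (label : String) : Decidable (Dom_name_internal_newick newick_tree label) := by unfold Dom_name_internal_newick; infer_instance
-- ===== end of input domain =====

-- B replaces A's char-by-char scan with split-on-')' and a join of labeled segments (idiomatic; same cost).

-- ===== PORT A =====
-- A's for-loop: each char is appended to the pieces list; after ')' the string label+str(i) is appended and i bumped.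
def nameA_go (label : String) : List Char → Int → List String
  | [], _ => []
  | c :: cs, i =>
    if c = ')' then
      String.ofList [c] :: (label ++ PySem.Int.toStr i) :: nameA_go label cs (i + 1)
    else
      String.ofList [c] :: nameA_go label cs i

def name_internal_newick (newick_tree : String) (label : String) : String :=
  PySem.Str.join "" (nameA_go label newick_tree.toList 1)

-- ===== PORT B =====
def nameB_piece (label : String) (p : Int × String) : String :=
  ")" ++ label ++ PySem.Int.toStr p.1 ++ p.2

def name_internal_newick_alt (newick_tree : String) (label : String) : String :=
  match (PySem.Chars.splitOn newick_tree.toList ")".toList).map String.ofList with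
  | [] => ""   -- unreachable: str.split always returns a non-empty list
  | p0 :: rest =>
      PySem.Str.join "" (p0 :: (PySem.List.enumerate rest 1).map (nameB_piece label))

-- ===== PRECONDITION & SPEC =====
def Spec_name_internal_newick (newick_tree : String) (label : String) (out : String) : Prop := out = name_internal_newick_alt newick_tree label
instance (newick_tree : String) (label : String) (out : String) : Decidable (Spec_name_internal_newick newick_tree label out) := by unfold Spec_name_internal_newick; infer_instance

-- ===== CLAIM (what is proved, stated in full; the proofs are below) =====
def Claim_equal_name_internal_newick : Prop := ∀ (newick_tree : String) (label : String), Dom_name_internal_newick newick_tree label → Spec_name_internal_newick newick_tree label (name_internal_newick newick_tree label)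

-- ===== LEMMAS AND PROOFS =====

-- reference single-char split carrying the current prefix (already in order)
def mySplit (c : Char) (pre : List Char) : List Char → List Char × List (List Char)
  | [] => (pre, [])
  | x :: xs =>
    if x = c then (pre, (mySplit c [] xs).1 :: (mySplit c [] xs).2)
    else mySplit c (pre ++ [x]) xs

theorem go_eq (c : Char) (fuel : Nat) : ∀ (l cur : List Char) (acc : List (List Char)),
    l.length < fuel →
    PySem.Chars.splitOn.go [c] fuel l cur acc
      = acc.reverse ++ (mySplit c cur.reverse l).1 :: (mySplit c cur.reverse l).2 := by
  induction fuel with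
  | zero => intro l cur acc h; omega
  | succ fuel ih =>
    intro l cur acc h
    cases l with
    | nil => simp [PySem.Chars.splitOn.go, mySplit]
    | cons x xs =>
      by_cases hx : x = c
      · subst hx
        have hstep : PySem.Chars.splitOn.go [x] (fuel + 1) (x :: xs) cur acc
            = PySem.Chars.splitOn.go [x] fuel xs [] (cur.reverse :: acc) := by
          simp [PySem.Chars.splitOn.go, List.isPrefixOf]
        rw [hstep, ih xs [] (cur.reverse :: acc) (by simpa using Nat.lt_of_succ_lt_succ h)]
        simp [mySplit]
      · have hstep : PySem.Chars.splitOn.go [c] (fuel + 1) (x :: xs) cur acc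
            = PySem.Chars.splitOn.go [c] fuel xs (x :: cur) acc := by
          simp [PySem.Chars.splitOn.go, List.isPrefixOf, Ne.symm hx]
        rw [hstep, ih xs (x :: cur) acc (by simpa using Nat.lt_of_succ_lt_succ h)]
        simp [mySplit, hx]

theorem splitOn_single (c : Char) (s : List Char) :
    PySem.Chars.splitOn s [c] = (mySplit c [] s).1 :: (mySplit c [] s).2 := by
  unfold PySem.Chars.splitOn
  simpa using go_eq c (s.length + 1) s [] [] (by omega)

theorem join_empty (ps : List (List Char)) : PySem.Chars.join [] ps = ps.flatten := by
  unfold PySem.Chars.join List.intercalate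
  induction ps with
  | nil => simp
  | cons p ps ih =>
    cases ps with
    | nil => simp
    | cons q qs => simpa [List.intersperse] using ih

def fB (labL : List Char) (p : Int × List Char) : List Char :=
  ')' :: (labL ++ (PySem.Int.toStr p.1).toList ++ p.2)

theorem enum_map {α β : Type} (f : α → β) (xs : List α) : ∀ (s : Int),
    PySem.List.enumerate (xs.map f) s
      = (PySem.List.enumerate xs s).map (fun p => (p.1, f p.2)) := by
  induction xs with
  | nil => intro s; simp [PySem.List.enumerate_nil]
  | cons x xs ih => intro s; simp [PySem.List.enumerate_cons, ih]

theorem main_lemma (label : String) : ∀ (s pre : List Char) (i : Int),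
    (mySplit ')' pre s).1 ++
      ((PySem.List.enumerate (mySplit ')' pre s).2 i).map (fB label.toList)).flatten
    = pre ++ ((nameA_go label s i).map String.toList).flatten := by
  intro s
  induction s with
  | nil => intro pre i; simp [mySplit, nameA_go, PySem.List.enumerate_nil]
  | cons x xs ih =>
    intro pre i
    by_cases hx : x = ')'
    · subst hx
      have h1 : mySplit ')' pre (')' :: xs)
          = (pre, (mySplit ')' [] xs).1 :: (mySplit ')' [] xs).2) := by simp [mySplit]
      have h2 : nameA_go label (')' :: xs) i
          = String.ofList [')'] :: (label ++ PySem.Int.toStr i) :: nameA_go label xs (i + 1) := by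
        simp [nameA_go]
      rw [h1, h2, PySem.List.enumerate_cons]
      have h3 := ih [] (i + 1)
      simp only [List.nil_append] at h3
      simp [fB, ← h3, String.toList_append]
    · have h1 : mySplit ')' pre (x :: xs) = mySplit ')' (pre ++ [x]) xs := by simp [mySplit, hx]
      have h2 : nameA_go label (x :: xs) i = String.ofList [x] :: nameA_go label xs i := by
        simp [nameA_go, hx]
      rw [h1, h2, ih (pre ++ [x]) i]
      simp

-- ===== VERDICT (by name: the statement is the Claim_ definition above) =====
theorem name_internal_newick_spec : Claim_equal_name_internal_newick := by
  unfold Claim_equal_name_internal_newick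
  intro t l _
  unfold Spec_name_internal_newick name_internal_newick name_internal_newick_alt
  rw [show (")" : String).toList = [')'] from rfl, splitOn_single]
  simp only [List.map_cons]
  unfold PySem.Str.join
  refine congrArg String.ofList ?_
  rw [show ("" : String).toList = [] from rfl, join_empty, join_empty]
  simp only [List.map_cons, List.flatten_cons, String.toList_ofList, enum_map, List.map_map]
  have hpieces : ∀ p : Int × List Char,
      (String.toList ∘ nameB_piece l ∘ fun p => (p.1, String.ofList p.2)) p = fB l.toList p := by
    intro p
    simp [nameB_piece, fB, String.toList_append]
  rw [show (List.map (String.toList ∘ nameB_piece l ∘ fun p => (p.1, String.ofList p.2))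
        (PySem.List.enumerate (mySplit ')' [] t.toList).2 1))
      = (PySem.List.enumerate (mySplit ')' [] t.toList).2 1).map (fB l.toList) from
    List.map_congr_left (fun p _ => hpieces p)]
  simpa using (main_lemma l t.toList [] 1).symm
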